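-- pv_equiv track=rewrite | github.com/tkozakas/data-analysis | 3/extract_features.py | feature_feedback_words
-- ===== SOURCE A (Python) =====
-- import unicodedata
--
-- def feature_feedback_words(msg):
--     text = msg["body"]
--     text_norm = unicodedata.normalize("NFKD", text).encode("ascii", "ignore").decode("ascii")
--     text_low = text_norm.lower()
--     keywords = [
--         "feedback", "recommendation", "reference", "review", "opinion",
--         "thoughts", "assessment", "evaluation", "input", "comments",
--         "insights", "testimonial", "atsiliepimas", "rekomendacija",
--         "apžvalga", "nuomonė", "mintys", "įvertinimas", "vertinimas",
--         "indėlis", "komentarai", "įžvalgos", "charakteristika", "отзыв",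
--         "рекомендация", "рецензия", "обзор", "мнение", "мысли", "оценка",
--         "вклад", "комментарии", "соображения", "характеристика"
--     ]
--     return any(k in text_low for k in keywords)
-- ===== SOURCE B (Python) =====
-- import unicodedata
--
-- _KEYWORDS = ("feedback recommendation reference review opinion thoughts assessment "
--              "evaluation input comments insights testimonial atsiliepimas rekomendacija "
--              "ap\u017evalga nuomon\u0117 mintys \u012fvertinimas vertinimas ind\u0117lis "
--              "komentarai \u012f\u017evalgos charakteristika \u043e\u0442\u0437\u044b\u0432 "
--              "\u0440\u0435\u043a\u043e\u043c\u0435\u043d\u0434\u0430\u0446\u0438\u044f "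
--              "\u0440\u0435\u0446\u0435\u043d\u0437\u0438\u044f \u043e\u0431\u0437\u043e\u0440 "
--              "\u043c\u043d\u0435\u043d\u0438\u0435 \u043c\u044b\u0441\u043b\u0438 "
--              "\u043e\u0446\u0435\u043d\u043a\u0430 \u0432\u043a\u043b\u0430\u0434 "
--              "\u043a\u043e\u043c\u043c\u0435\u043d\u0442\u0430\u0440\u0438\u0438 "
--              "\u0441\u043e\u043e\u0431\u0440\u0430\u0436\u0435\u043d\u0438\u044f "
--              "\u0445\u0430\u0440\u0430\u043a\u0442\u0435\u0440\u0438\u0441\u0442\u0438\u043a\u0430").split()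
--
--
-- def feature_feedback_words(msg):
--     t = unicodedata.normalize("NFKD", msg["body"]).encode("ascii", "ignore").decode("ascii").lower()
--     # one left-to-right pass: at each position, a keyword matches only if it starts
--     # with the character there (cheap guard), then confirm with startswith
--     for i in range(len(t)):
--         head = t[i]
--         for k in _KEYWORDS:
--             if k[0] == head and t.startswith(k, i):
--                 return True
--     return False
-- ===== Notes on version B (the rewrite author's own statement) =====
-- stated objective: alternative
-- what changed: A runs 35 independent substring scans ('k in text' per keyword) over the normalized text; B makes one left-to-right pass over the text and at each position tests, with a first-character guard, whether some keyword starts there, keywords being kept as one whitespace-split string.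
import Mathlib
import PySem

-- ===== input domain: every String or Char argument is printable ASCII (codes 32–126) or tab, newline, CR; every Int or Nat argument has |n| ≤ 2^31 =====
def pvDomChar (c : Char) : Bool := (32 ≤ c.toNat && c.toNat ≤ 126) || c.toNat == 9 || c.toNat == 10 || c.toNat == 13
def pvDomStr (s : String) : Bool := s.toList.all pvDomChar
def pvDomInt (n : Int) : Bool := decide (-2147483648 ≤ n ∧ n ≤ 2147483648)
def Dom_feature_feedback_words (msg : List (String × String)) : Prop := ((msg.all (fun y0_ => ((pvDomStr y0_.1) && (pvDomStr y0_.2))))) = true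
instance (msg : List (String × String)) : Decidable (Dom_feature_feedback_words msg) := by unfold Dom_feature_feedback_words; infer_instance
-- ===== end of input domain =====

-- B replaces A's 35 independent substring scans by one left-to-right pass over the
-- text, testing at each position (with a first-character guard) whether a keyword
-- starts there; keywords are kept as one whitespace-split string (objective: alternative).
-- ===== PORT A =====
-- keyword list of A
def fbKeywords : List String := [
    "feedback", "recommendation", "reference", "review", "opinion",
    "thoughts", "assessment", "evaluation", "input", "comments",
    "insights", "testimonial", "atsiliepimas", "rekomendacija",
    "apžvalga", "nuomonė", "mintys", "įvertinimas", "vertinimas",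
    "indėlis", "komentarai", "įžvalgos", "charakteristika", "отзыв",
    "рекомендация", "рецензия", "обзор", "мнение", "мысли", "оценка",
    "вклад", "комментарии", "соображения", "характеристика"]

-- unicodedata.normalize("NFKD", text).encode("ascii","ignore").decode("ascii"):
-- ported by hand; exact on the ASCII domain Dom_, where NFKD is the identity and
-- encode("ascii","ignore") keeps exactly the code points below 128.
def fbAsciiNorm (cs : List Char) : List Char := cs.filter (fun c => c.toNat ≤ 127)

def feature_feedback_words (msg : List (String × String)) : Bool :=
  match (PySem.Dict.mk msg).get? "body" with
  | none => false  -- KeyError in Python: excluded by Pre_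
  | some text =>
    let textLow := PySem.Chars.lower (fbAsciiNorm text.toList)
    fbKeywords.any (fun k => PySem.Chars.isIn k.toList textLow)

-- ===== PORT B =====
-- B's keywords: one whitespace-split string (same words as A's list)
def fbKeyStrB : String := "feedback recommendation reference review opinion thoughts assessment evaluation input comments insights testimonial atsiliepimas rekomendacija apžvalga nuomonė mintys įvertinimas vertinimas indėlis komentarai įžvalgos charakteristika отзыв рекомендация рецензия обзор мнение мысли оценка вклад комментарии соображения характеристика"
def fbKeywordsB : List (List Char) := PySem.Chars.split₀ fbKeyStrB.toList

-- the left-to-right scan of Source B: at position i (here: suffix head :: rest),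
-- 'k[0] == head and t.startswith(k, i)' — the guard and the startswith at i are
-- fused into (k0 == head && startswith rest ktail), their conjunction's value.
-- The [] branch is unreachable: split₀ yields nonempty tokens (Python's k[0]).
def fbScanB (t : List Char) : Bool :=
  match t with
  | [] => false
  | head :: rest =>
    (fbKeywordsB.any (fun k =>
      match k with
      | [] => false
      | k0 :: ktail => k0 == head && PySem.Chars.startswith rest ktail))
    || fbScanB rest

def feature_feedback_words_alt (msg : List (String × String)) : Bool :=
  match (PySem.Dict.mk msg).get? "body" with
  | none => false  -- KeyError in Python: excluded by Pre_
  | some text =>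
    fbScanB (PySem.Chars.lower (fbAsciiNorm text.toList))

-- ===== PRECONDITION & SPEC =====
-- Pre_ excludes exactly the inputs without a "body" key, on which A raises KeyError.
def Pre_feature_feedback_words (msg : List (String × String)) : Prop :=
  "body" ∈ msg.map Prod.fst
instance (msg : List (String × String)) : Decidable (Pre_feature_feedback_words msg) := by
  unfold Pre_feature_feedback_words; infer_instance
def pvWitness_feature_feedback_words : (List (String × String)) := [("body", "some feedback")]

def Spec_feature_feedback_words (msg : List (String × String)) (out : Bool) : Prop := out = feature_feedback_words_alt msg
instance (msg : List (String × String)) (out : Bool) : Decidable (Spec_feature_feedback_words msg out) := by unfold Spec_feature_feedback_words; infer_instance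

-- ===== CLAIM (what is proved, stated in full; the proofs are below) =====
def Claim_equal_feature_feedback_words : Prop := ∀ (msg : List (String × String)), Dom_feature_feedback_words msg → Pre_feature_feedback_words msg → Spec_feature_feedback_words msg (feature_feedback_words msg)

-- ===== LEMMAS AND PROOFS =====
-- B's split string yields exactly A's keyword list
set_option maxRecDepth 4000 in
lemma fbKeywordsB_eq : fbKeywordsB = fbKeywords.map String.toList := by decide

-- every keyword is nonempty
lemma fbKeywords_ne_nil : ∀ k ∈ fbKeywords, k.toList ≠ [] := by decide

lemma fb_startswith_cons (c : Char) (s : List Char) (p0 : Char) (ps : List Char) :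
    PySem.Chars.startswith (c :: s) (p0 :: ps)
      = (p0 == c && PySem.Chars.startswith s ps) := by
  simp [PySem.Chars.startswith, List.isPrefixOf]

lemma fb_isIn_cons (sub : List Char) (c : Char) (s : List Char) :
    PySem.Chars.isIn sub (c :: s)
      = (PySem.Chars.startswith (c :: s) sub || PySem.Chars.isIn sub s) := by
  rw [Bool.eq_iff_iff]
  simp [PySem.Chars.isIn_iff_infix, PySem.Chars.startswith_iff, List.infix_cons_iff]

lemma fb_match_eq (k : String) (hk : k ∈ fbKeywords) (head : Char) (rest : List Char) :
    (match k.toList with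
     | [] => false
     | k0 :: ktail => k0 == head && PySem.Chars.startswith rest ktail)
      = PySem.Chars.startswith (head :: rest) k.toList := by
  cases h : k.toList with
  | nil => exact absurd h (fbKeywords_ne_nil k hk)
  | cons k0 kt => rw [fb_startswith_cons]

lemma fbScanB_eq (tl : List Char) :
    fbScanB tl = fbKeywords.any (fun k => PySem.Chars.isIn k.toList tl) := by
  induction tl with
  | nil => decide
  | cons head rest ih =>
    rw [fbScanB, fbKeywordsB_eq, List.any_map, ih, Bool.eq_iff_iff]
    simp only [Bool.or_eq_true, List.any_eq_true, Function.comp]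
    constructor
    · rintro (⟨k, hk, h⟩ | ⟨k, hk, h⟩) <;> refine ⟨k, hk, ?_⟩ <;>
        rw [fb_isIn_cons, Bool.or_eq_true]
      · exact Or.inl ((fb_match_eq k hk head rest) ▸ h)
      · exact Or.inr h
    · rintro ⟨k, hk, h⟩
      rw [fb_isIn_cons, Bool.or_eq_true] at h
      cases h with
      | inl h => exact Or.inl ⟨k, hk, (fb_match_eq k hk head rest) ▸ h⟩
      | inr h => exact Or.inr ⟨k, hk, h⟩

-- ===== VERDICT (by name: the statement is the Claim_ definition above) =====
theorem feature_feedback_words_spec : Claim_equal_feature_feedback_words := by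
  intro msg _ _
  unfold Spec_feature_feedback_words feature_feedback_words feature_feedback_words_alt
  cases (PySem.Dict.mk msg).get? "body" with
  | none => rfl
  | some text => exact (fbScanB_eq _).symm
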